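-- pv_equiv track=rewrite | github.com/daniel-reich/ubiquitous-fiesta | g5HP8CmfXd7am7NtX_23.py | keyboard_mistakes
-- ===== SOURCE A (Python) =====
-- def keyboard_mistakes(txt):
--   a_word = list(txt)
--   word = ''
--   for position, letter in enumerate(a_word):
--     if letter == '4':
--       word += 'A'
--     elif letter == '5':
--       word += 'S'
--     elif letter == '1':
--       word += 'I'
--     elif letter == '0':
--       word += 'O'
--     else:
--       word += a_word[position]
--   return word
-- ===== SOURCE B (Python) =====
-- def keyboard_mistakes(txt):
--   return txt.replace('4', 'A').replace('5', 'S').replace('1', 'I').replace('0', 'O')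
-- ===== Notes on version B (the rewrite author's own statement) =====
-- stated objective: faster
-- what changed: Replaces the enumerate loop with an if/elif ladder and quadratic string accumulation by four chained str.replace calls, one C-level full-string scan per digit (safe because the substituted letters A/S/I/O are never themselves replaced).
import Mathlib
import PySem

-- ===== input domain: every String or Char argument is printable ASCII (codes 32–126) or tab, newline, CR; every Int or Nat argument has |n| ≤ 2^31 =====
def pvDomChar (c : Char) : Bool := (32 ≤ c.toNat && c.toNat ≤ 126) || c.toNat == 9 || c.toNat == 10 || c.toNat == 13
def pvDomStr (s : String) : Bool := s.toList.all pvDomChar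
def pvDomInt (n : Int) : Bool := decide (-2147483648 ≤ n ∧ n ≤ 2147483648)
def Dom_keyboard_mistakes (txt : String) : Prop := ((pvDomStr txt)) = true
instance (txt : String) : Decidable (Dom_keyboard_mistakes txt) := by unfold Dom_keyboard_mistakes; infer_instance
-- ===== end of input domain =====

-- B replaces A's single enumerate loop with an if/elif ladder by four chained str.replace calls (idiomatic; same observable result).

-- ===== PORT A =====
def keyboard_mistakes (txt : String) : String :=
  let a_word := txt.toList
  (PySem.List.enumerate a_word).foldl
    (fun word pl =>
      if pl.2 = '4' then word ++ "A"
      else if pl.2 = '5' then word ++ "S"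
      else if pl.2 = '1' then word ++ "I"
      else if pl.2 = '0' then word ++ "O"
      else word ++ String.ofList ((PySem.List.pyGet? a_word pl.1).elim [] (fun c => [c]))) ""

-- ===== PORT B =====
def keyboard_mistakes_alt (txt : String) : String :=
  PySem.Str.replace (PySem.Str.replace (PySem.Str.replace (PySem.Str.replace txt "4" "A") "5" "S") "1" "I") "0" "O"

-- ===== PRECONDITION & SPEC =====
def Spec_keyboard_mistakes (txt : String) (out : String) : Prop := out = keyboard_mistakes_alt txt
instance (txt : String) (out : String) : Decidable (Spec_keyboard_mistakes txt out) := by unfold Spec_keyboard_mistakes; infer_instance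

-- ===== CLAIM (what is proved, stated in full; the proofs are below) =====
def Claim_equal_keyboard_mistakes : Prop := ∀ (txt : String), Dom_keyboard_mistakes txt → Spec_keyboard_mistakes txt (keyboard_mistakes txt)

-- ===== LEMMAS AND PROOFS =====

/-- character substitution performed by a single-character `str.replace` -/
def pvSubst (o n c : Char) : Char := if c = o then n else c

/-- the if/elif ladder of A, as a per-character function -/
def pvLadder (c : Char) : Char :=
  if c = '4' then 'A' else if c = '5' then 'S' else if c = '1' then 'I' else if c = '0' then 'O' else c

theorem pv_go_single (o n : Char) :
    ∀ (l : List Char) (fuel : Nat) (acc : List Char), l.length ≤ fuel →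
      PySem.Chars.replace.go [o] [n] fuel l acc = acc.reverse ++ l.map (pvSubst o n) := by
  intro l
  induction l with
  | nil =>
    intro fuel acc _
    cases fuel <;> simp [PySem.Chars.replace.go]
  | cons c t ih =>
    intro fuel acc h
    cases fuel with
    | zero => simp at h
    | succ m =>
      by_cases hc : c = o
      · subst hc
        simp only [PySem.Chars.replace.go, List.isPrefixOf, BEq.rfl, Bool.true_and,
          if_true]
        rw [show List.drop [c].length (c :: t) = t from rfl, ih m _ (by simpa using h)]
        simp [pvSubst]
      · have hb : ([o].isPrefixOf (c :: t)) = false := by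
          simp [List.isPrefixOf]
          exact fun h' => hc h'.symm
        simp only [PySem.Chars.replace.go, hb]
        rw [ih m _ (by simpa using h)]
        simp [pvSubst, hc]

theorem pv_replace_single (s : List Char) (o n : Char) :
    PySem.Chars.replace s [o] [n] = s.map (pvSubst o n) := by
  rw [PySem.Chars.replace]
  simp only [List.isEmpty_cons, if_false, Bool.false_eq_true]
  exact pv_go_single o n s s.length [] le_rfl

theorem pv_alt_toList (txt : String) :
    (keyboard_mistakes_alt txt).toList = txt.toList.map pvLadder := by
  unfold keyboard_mistakes_alt
  simp only [PySem.Str.toList_replace]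
  have h4 : ("4" : String).toList = ['4'] := rfl
  have hA : ("A" : String).toList = ['A'] := rfl
  have h5 : ("5" : String).toList = ['5'] := rfl
  have hS : ("S" : String).toList = ['S'] := rfl
  have h1 : ("1" : String).toList = ['1'] := rfl
  have hI : ("I" : String).toList = ['I'] := rfl
  have h0 : ("0" : String).toList = ['0'] := rfl
  have hO : ("O" : String).toList = ['O'] := rfl
  rw [h4, hA, h5, hS, h1, hI, h0, hO,
    pv_replace_single, pv_replace_single, pv_replace_single, pv_replace_single]
  simp only [List.map_map]
  apply List.map_congr_left
  intro c _
  simp only [Function.comp, pvSubst, pvLadder]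
  by_cases c4 : c = '4'
  · subst c4; decide
  · by_cases c5 : c = '5'
    · subst c5; decide
    · by_cases c1 : c = '1'
      · subst c1; decide
      · by_cases c0 : c = '0'
        · subst c0; decide
        · simp [c4, c5, c1, c0]

theorem pv_foldl_enum (l : List Char) :
    ∀ (s : Int) (w : String),
      ((PySem.List.enumerate l s).foldl
        (fun word pl => word ++ String.ofList [pvLadder pl.2]) w).toList
      = w.toList ++ l.map pvLadder := by
  induction l with
  | nil => intro s w; simp [PySem.List.enumerate]
  | cons c t ih =>
    intro s w
    rw [PySem.List.enumerate_cons]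
    simp only [List.foldl_cons]
    rw [ih]
    simp

theorem pv_A_toList (txt : String) :
    (keyboard_mistakes txt).toList = txt.toList.map pvLadder := by
  unfold keyboard_mistakes
  rw [PySem.List.foldl_congr_mem _ _
    (fun word pl => word ++ String.ofList [pvLadder pl.2]) ""]
  · exact pv_foldl_enum txt.toList 0 ""
  · intro acc pl hpl
    rcases (PySem.List.mem_enumerate_iff _ _ _).1 hpl with ⟨k, hk, rfl⟩
    have hget : PySem.List.pyGet? txt.toList ((0 : Int) + k) = some (txt.toList[k]) := by
      rw [zero_add, PySem.List.pyGet?_natCast]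
      simp
    simp only [hget, Option.elim, pvLadder]
    split_ifs <;> rfl

-- ===== VERDICT (by name: the statement is the Claim_ definition above) =====
theorem keyboard_mistakes_spec : Claim_equal_keyboard_mistakes := by
  intro txt _
  unfold Spec_keyboard_mistakes
  have h : (keyboard_mistakes txt).toList = (keyboard_mistakes_alt txt).toList := by
    rw [pv_A_toList, pv_alt_toList]
  calc keyboard_mistakes txt = String.ofList (keyboard_mistakes txt).toList := String.ofList_toList.symm
    _ = String.ofList (keyboard_mistakes_alt txt).toList := by rw [h]
    _ = keyboard_mistakes_alt txt := String.ofList_toList
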